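-- pv_equiv track=rewrite | github.com/ricardo-dlc/bajux-data-import | product.py | generate_provider_code
-- ===== SOURCE A (Python) =====
-- def generate_provider_code(provider_name):
--     # Split the provider name into words
--     words = provider_name.split()
--     num_words = len(words)
--
--     if num_words == 1:
--         # Case: 1 word, take the first 4 letters of the word
--         base_code = words[0][:4].upper()
--     elif num_words == 2:
--         # Case: 2 words, take 2 letters from each word
--         base_code = (words[0][:2] + words[1][:2]).upper()
--     elif num_words == 3:
--         # Case: 3 words, take 2 letters from the first word and 1 letter from each subsequent word
--         base_code = (words[0][:2] + words[1][0] + words[2][0]).upper()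
--     else:
--         # Case: 4 or more words, take the first letter from the first 4 words
--         base_code = ''.join(word[0] for word in words[:4]).upper()
--
--     return base_code
-- ===== SOURCE B (Python) =====
-- def generate_provider_code(provider_name):
--     # pass 1: count the words (a word = maximal run of non-whitespace)
--     k = 0
--     prev_space = True
--     for c in provider_name:
--         if c.isspace():
--             prev_space = True
--         else:
--             if prev_space:
--                 k += 1
--             prev_space = False
--
--     def limit(wi):
--         # how many characters of word number wi (0-based) go into the code,
--         # given the total word count k
--         if k == 1:
--             return 4 if wi == 0 else 0
--         if k == 2:
--             return 2 if wi < 2 else 0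
--         if k == 3:
--             return 2 if wi == 0 else (1 if wi < 3 else 0)
--         return 1 if wi < 4 else 0
--
--     # pass 2: stream the characters, emitting the qualifying ones uppercased
--     out = []
--     n = 0        # words entered so far
--     lim = 0      # limit of the current word
--     pos = 0      # position inside the current word
--     prev_space = True
--     for c in provider_name:
--         if c.isspace():
--             prev_space = True
--         else:
--             if prev_space:
--                 lim = limit(n)
--                 n += 1
--                 pos = 0
--                 prev_space = False
--             if pos < lim:
--                 out.append(c.upper())
--             pos += 1
--     return ''.join(out)
-- ===== Notes on version B (the rewrite author's own statement) =====
-- stated objective: alternative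
-- what changed: Replaces split-into-words plus four branch-specific slice/index expressions by a character-level streaming state machine: one pass counts the words, a second pass walks the raw characters tracking (word index, in-word position) and emits each qualifying character uppercased — no split, no slicing, no per-count branches on word data.
import Mathlib
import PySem

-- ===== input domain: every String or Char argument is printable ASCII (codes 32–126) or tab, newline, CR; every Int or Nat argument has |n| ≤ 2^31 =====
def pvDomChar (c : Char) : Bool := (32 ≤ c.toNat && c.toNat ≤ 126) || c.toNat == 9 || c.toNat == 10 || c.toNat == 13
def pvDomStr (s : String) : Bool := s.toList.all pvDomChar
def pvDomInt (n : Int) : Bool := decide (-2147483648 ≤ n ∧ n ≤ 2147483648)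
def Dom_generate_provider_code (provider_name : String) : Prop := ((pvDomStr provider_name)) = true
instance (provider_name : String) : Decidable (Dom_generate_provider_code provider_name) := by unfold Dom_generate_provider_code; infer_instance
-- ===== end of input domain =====

-- B replaces A's split + per-word-count slice branches by a character-level streaming state
-- machine (count words, then emit qualifying characters uppercased); same return value everywhere.

-- ===== PORT A =====
def generate_provider_code (provider_name : String) : String :=
  let words := PySem.Chars.split₀ provider_name.toList
  let num_words := words.length
  let base_code : List Char :=
    if num_words = 1 then
      PySem.Chars.upper (PySem.List.slice (words.getD 0 []) none (some 4))
    else if num_words = 2 then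
      PySem.Chars.upper (PySem.List.slice (words.getD 0 []) none (some 2) ++
        PySem.List.slice (words.getD 1 []) none (some 2))
    else if num_words = 3 then
      PySem.Chars.upper (PySem.List.slice (words.getD 0 []) none (some 2) ++
        (PySem.List.pyGet? (words.getD 1 []) 0).elim [] (fun c => [c]) ++
        (PySem.List.pyGet? (words.getD 2 []) 0).elim [] (fun c => [c]))
    else
      PySem.Chars.upper (PySem.Chars.join []
        ((PySem.List.slice words none (some 4)).map
          (fun w => (PySem.List.pyGet? w 0).elim [] (fun c => [c]))))
  String.ofList base_code

-- ===== PORT B =====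
-- pass 1 of Source B: count the words (prev = prev_space flag)
def pvCount : List Char → Bool → Nat
  | [], _ => 0
  | c :: rest, prev =>
    if PySem.Chars.isspace c then pvCount rest true
    else (if prev then 1 else 0) + pvCount rest false

-- Source B's `limit` closure
def pvLimit (k wi : Nat) : Nat :=
  if k = 1 then (if wi = 0 then 4 else 0)
  else if k = 2 then (if wi < 2 then 2 else 0)
  else if k = 3 then (if wi = 0 then 2 else if wi < 3 then 1 else 0)
  else (if wi < 4 then 1 else 0)

-- pass 2 of Source B: stream characters; state = (n words entered, current limit, position, prev_space)
def pvEmit (k : Nat) : List Char → Nat → Nat → Nat → Bool → List Char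
  | [], _, _, _, _ => []
  | c :: rest, n, lim, pos, prev =>
    if PySem.Chars.isspace c then pvEmit k rest n lim pos true
    else
      let st := if prev then (n + 1, pvLimit k n, 0) else (n, lim, pos)
      (if st.2.2 < st.2.1 then [PySem.Chars.upperChar c] else []) ++
        pvEmit k rest st.1 st.2.1 (st.2.2 + 1) false

def generate_provider_code_alt (provider_name : String) : String :=
  let k := pvCount provider_name.toList true
  String.ofList (pvEmit k provider_name.toList 0 0 0 true)

-- ===== PRECONDITION & SPEC =====
def Spec_generate_provider_code (provider_name : String) (out : String) : Prop := out = generate_provider_code_alt provider_name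
instance (provider_name : String) (out : String) : Decidable (Spec_generate_provider_code provider_name out) := by unfold Spec_generate_provider_code; infer_instance

-- ===== CLAIM (what is proved, stated in full; the proofs are below) =====
def Claim_equal_generate_provider_code : Prop := ∀ (provider_name : String), Dom_generate_provider_code provider_name → Spec_generate_provider_code provider_name (generate_provider_code provider_name)

-- ===== LEMMAS AND PROOFS =====

-- the word-wise characterisation of B's emission pass
def pvF (k : Nat) : Nat → List (List Char) → List Char
  | _, [] => []
  | n, w :: ws => PySem.Chars.upper (w.take (pvLimit k n)) ++ pvF k (n + 1) ws

-- leading non-space run of s, and what is left from the first space on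
def pvWrest : List Char → List Char
  | [] => []
  | c :: r => if PySem.Chars.isspace c then [] else c :: pvWrest r

def pvWdrop : List Char → List Char
  | [] => []
  | c :: r => if PySem.Chars.isspace c then c :: r else pvWdrop r

theorem pv_go_acc (s : List Char) (cur : List Char) (acc : List (List Char)) :
    PySem.Chars.split₀.go s cur acc = acc.reverse ++ PySem.Chars.split₀.go s cur [] := by
  induction s generalizing cur acc with
  | nil => simp only [PySem.Chars.split₀.go]; split_ifs <;> simp
  | cons c rest ih =>
    simp only [PySem.Chars.split₀.go]
    split_ifs with h1 h2
    · exact ih [] acc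
    · rw [ih [] (cur.reverse :: acc), ih [] [cur.reverse]]; simp
    · exact ih (c :: cur) acc

theorem pv_split₀_cons_space (c : Char) (r : List Char) (h : PySem.Chars.isspace c = true) :
    PySem.Chars.split₀ (c :: r) = PySem.Chars.split₀ r := by
  simp [PySem.Chars.split₀, PySem.Chars.split₀.go, h]

theorem pv_go_word (s : List Char) : ∀ cur : List Char, cur ≠ [] →
    PySem.Chars.split₀.go s cur [] =
      (cur.reverse ++ pvWrest s) :: PySem.Chars.split₀ (pvWdrop s) := by
  induction s with
  | nil =>
    intro cur hcur
    simp [PySem.Chars.split₀.go, PySem.Chars.split₀, List.isEmpty_iff, hcur, pvWrest, pvWdrop]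
  | cons c rest ih =>
    intro cur hcur
    by_cases h1 : PySem.Chars.isspace c = true
    · simp only [PySem.Chars.split₀.go, h1, if_true, pvWrest, pvWdrop,
        if_neg (show ¬cur.isEmpty = true by simp [List.isEmpty_iff, hcur])]
      rw [pv_go_acc rest [] [cur.reverse], pv_split₀_cons_space c rest h1]
      simp [PySem.Chars.split₀]
    · simp only [PySem.Chars.split₀.go, if_neg h1, pvWrest, pvWdrop]
      rw [ih (c :: cur) (by simp)]
      simp

theorem pv_split₀_cons_word (c : Char) (r : List Char) (h : PySem.Chars.isspace c = false) :
    PySem.Chars.split₀ (c :: r) = (c :: pvWrest r) :: PySem.Chars.split₀ (pvWdrop r) := by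
  have : PySem.Chars.split₀ (c :: r) = PySem.Chars.split₀.go r [c] [] := by
    simp [PySem.Chars.split₀, PySem.Chars.split₀.go, h]
  rw [this, pv_go_word r [c] (by simp)]
  simp

-- word count = number of words of split₀
theorem pv_count_go (s : List Char) : ∀ (cur : List Char) (acc : List (List Char)),
    (PySem.Chars.split₀.go s cur acc).length =
      acc.length + (if cur.isEmpty then 0 else 1) + pvCount s cur.isEmpty := by
  induction s with
  | nil =>
    intro cur acc
    simp only [PySem.Chars.split₀.go, pvCount]
    split_ifs <;> simp
  | cons c rest ih =>
    intro cur acc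
    simp only [PySem.Chars.split₀.go, pvCount]
    split_ifs with h1 h2
    · rw [ih [] acc]; simp
    · rw [ih [] (cur.reverse :: acc)]; simp
    · rw [ih (c :: cur) acc]
      simp only [List.isEmpty_cons, Bool.false_eq_true, if_false]
      omega
    · rw [ih (c :: cur) acc]
      simp only [List.isEmpty_cons, Bool.false_eq_true, if_false]
      omega

theorem pv_count_eq (s : List Char) :
    pvCount s true = (PySem.Chars.split₀ s).length := by
  have := pv_count_go s [] []
  simp [PySem.Chars.split₀] at this ⊢
  omega

-- every word produced by str.split() is nonempty (loop invariant of split₀.go)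
theorem pv_go_ne_nil (s : List Char) (cur : List Char) (acc : List (List Char))
    (hacc : ∀ w ∈ acc, w ≠ []) :
    ∀ w ∈ PySem.Chars.split₀.go s cur acc, w ≠ [] := by
  induction s generalizing cur acc with
  | nil =>
    intro w hw
    simp only [PySem.Chars.split₀.go] at hw
    split_ifs at hw with h
    · exact hacc w (List.mem_reverse.mp hw)
    · rcases List.mem_cons.mp (List.mem_reverse.mp hw) with h' | h'
      · subst h'
        simpa [List.isEmpty_iff] using h
      · exact hacc w h'
  | cons c rest ih =>
    intro w hw
    simp only [PySem.Chars.split₀.go] at hw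
    split_ifs at hw with h1 h2
    · exact ih [] acc hacc w hw
    · refine ih [] (cur.reverse :: acc) ?_ w hw
      intro v hv
      rcases List.mem_cons.mp hv with hv | hv
      · subst hv
        simpa [List.isEmpty_iff] using h2
      · exact hacc v hv
    · exact ih (c :: cur) acc hacc w hw

theorem pv_split₀_ne_nil (s : List Char) : ∀ w ∈ PySem.Chars.split₀ s, w ≠ [] := by
  unfold PySem.Chars.split₀
  exact pv_go_ne_nil s [] [] (by simp)

-- joint characterisation of the emission pass, in and between words
theorem pv_emit_char (k : Nat) (s : List Char) :
    (∀ n lim pos, pvEmit k s n lim pos true = pvF k n (PySem.Chars.split₀ s)) ∧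
    (∀ n lim pos, pvEmit k s n lim pos false =
      PySem.Chars.upper ((pvWrest s).take (lim - pos)) ++
        pvF k n (PySem.Chars.split₀ (pvWdrop s))) := by
  induction s with
  | nil => constructor <;> intro n lim pos <;>
      simp [pvEmit, pvF, pvWrest, pvWdrop, PySem.Chars.split₀, PySem.Chars.split₀.go,
        PySem.Chars.upper]
  | cons c rest ih =>
    constructor
    · intro n lim pos
      by_cases h1 : PySem.Chars.isspace c = true
      · simp only [pvEmit, h1, if_true]
        rw [pv_split₀_cons_space c rest h1]
        exact ih.1 n lim pos
      · simp only [pvEmit, if_neg h1, if_true]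
        rw [ih.2 (n + 1) (pvLimit k n) 1,
          pv_split₀_cons_word c rest (by simpa using h1)]
        cases hL : pvLimit k n with
        | zero => simp [pvF, hL, PySem.Chars.upper]
        | succ m => simp [pvF, hL, PySem.Chars.upper]
    · intro n lim pos
      by_cases h1 : PySem.Chars.isspace c = true
      · simp only [pvEmit, h1, if_true]
        rw [ih.1 n lim pos]
        simp [pvWrest, pvWdrop, h1, PySem.Chars.upper, pv_split₀_cons_space c rest h1]
      · simp only [pvEmit, if_neg h1, Bool.false_eq_true, if_false]
        rw [ih.2 n lim (pos + 1)]
        simp only [pvWrest, pvWdrop, if_neg h1]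
        rcases Nat.lt_or_ge pos lim with h | h
        · obtain ⟨m, hm⟩ : ∃ m, lim - pos = m + 1 := ⟨lim - pos - 1, by omega⟩
          have hm2 : lim - (pos + 1) = m := by omega
          simp [h, hm, hm2, PySem.Chars.upper]
        · have h0 : lim - pos = 0 := by omega
          have h0' : lim - (pos + 1) = 0 := by omega
          simp [Nat.not_lt.mpr h, h0, h0', PySem.Chars.upper]

-- tail words beyond the fourth contribute nothing when the word count is not 1, 2 or 3
theorem pvF_nil_of_ge (k : Nat) (hk1 : k ≠ 1) (hk2 : k ≠ 2) (hk3 : k ≠ 3) :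
    ∀ (L : List (List Char)) (n : Nat), 4 ≤ n → pvF k n L = [] := by
  intro L
  induction L with
  | nil => intro n _; simp [pvF]
  | cons w ws ih =>
    intro n hn
    simp [pvF, pvLimit, hk1, hk2, hk3, Nat.not_lt.mpr hn, PySem.Chars.upper,
      ih (n + 1) (by omega)]

theorem pv_main (s : String) : generate_provider_code s = generate_provider_code_alt s := by
  have hne := pv_split₀_ne_nil s.toList
  unfold generate_provider_code generate_provider_code_alt
  dsimp only
  rw [pv_count_eq, (pv_emit_char (PySem.Chars.split₀ s.toList).length s.toList).1]
  generalize hL : PySem.Chars.split₀ s.toList = L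
  rw [hL] at hne
  rcases L with _ | ⟨w1, L⟩
  · simp [PySem.List.slice, PySem.Chars.join_nil, PySem.Chars.upper, pvF]
  rcases L with _ | ⟨w2, L⟩
  · simp [PySem.Chars.upper, pvF, pvLimit, PySem.List.slice_to]
  rcases L with _ | ⟨w3, L⟩
  · simp [PySem.Chars.upper, pvF, pvLimit, PySem.List.slice_to]
  rcases L with _ | ⟨w4, L⟩
  · obtain ⟨c2, t2, rfl⟩ := List.exists_cons_of_ne_nil (hne w2 (by simp))
    obtain ⟨c3, t3, rfl⟩ := List.exists_cons_of_ne_nil (hne w3 (by simp))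
    simp [PySem.Chars.upper, pvF, pvLimit, PySem.List.slice_to, PySem.List.pyGet?,
      PySem.List.pyIdx?]
  · obtain ⟨c1, t1, rfl⟩ := List.exists_cons_of_ne_nil (hne w1 (by simp))
    obtain ⟨c2, t2, rfl⟩ := List.exists_cons_of_ne_nil (hne w2 (by simp))
    obtain ⟨c3, t3, rfl⟩ := List.exists_cons_of_ne_nil (hne w3 (by simp))
    obtain ⟨c4, t4, rfl⟩ := List.exists_cons_of_ne_nil (hne w4 (by simp))
    have hk1 : L.length + 1 + 1 + 1 + 1 ≠ 1 := by omega
    have hk2 : L.length + 1 + 1 + 1 + 1 ≠ 2 := by omega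
    have hk3 : L.length + 1 + 1 + 1 + 1 ≠ 3 := by omega
    simp [PySem.Chars.upper, pvF, pvLimit, PySem.List.slice_to, PySem.List.pyGet?,
      PySem.List.pyIdx?, PySem.Chars.join_singleton, PySem.Chars.join_cons_cons,
      hk2, hk3,
      pvF_nil_of_ge (L.length + 1 + 1 + 1 + 1) hk1 hk2 hk3 L 4 (by omega)]

-- ===== VERDICT (by name: the statement is the Claim_ definition above) =====
theorem generate_provider_code_spec : Claim_equal_generate_provider_code := by
  intro s _
  unfold Spec_generate_provider_code
  exact pv_main s
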